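-- pv_equiv track=rewrite | github.com/RobotSail/commitfinder | commitfinder.py | investigate_duplicates
-- ===== SOURCE A (Python) =====
-- def investigate_duplicates(
--     backports: dict[str, list[dict]]
-- ) -> dict[list[tuple[str, dict]]]:
--     # this function just goes through and collects all backport objects with matching upstream commit hashes
--     # and outputs all of the ones with length over 1
--     matching_backports = {}
--     for repo, bps in backports.items():
--         for bp in bps:
--             upstream_hash = bp["upstream_commit_hash"]
--             if upstream_hash not in matching_backports:
--                 matching_backports[upstream_hash] = []
--             matching_backports[upstream_hash].append((repo, bp))
--
--     return {k: v for k, v in matching_backports.items() if len(v) > 1}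
-- ===== SOURCE B (Python) =====
-- def investigate_duplicates(
--     backports: dict[str, list[dict]]
-- ) -> dict[list[tuple[str, dict]]]:
--     # Flatten to (hash, repo, bp) triples, take first-occurrence-ordered distinct
--     # hashes, group by scanning the flat list, and keep groups longer than 1.
--     triples = [(bp["upstream_commit_hash"], repo, bp)
--                for repo, bps in backports.items() for bp in bps]
--     hashes = list(dict.fromkeys(h for h, _, _ in triples))
--     groups = {h: [(r, b) for h2, r, b in triples if h2 == h] for h in hashes}
--     return {h: g for h, g in groups.items() if len(g) > 1}
-- ===== Notes on version B (the rewrite author's own statement) =====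
-- stated objective: alternative
-- what changed: Replaces A's incremental hash-bucketing dict (create-bucket-then-append per item, filter at the end) with a flatten / first-occurrence dedup / group-by-scan decomposition: all (hash, repo, bp) triples are flattened into one list, the distinct hashes are taken in first-occurrence order via dict.fromkeys, and each hash's group is collected by a scan over the flat list.
import Mathlib
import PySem

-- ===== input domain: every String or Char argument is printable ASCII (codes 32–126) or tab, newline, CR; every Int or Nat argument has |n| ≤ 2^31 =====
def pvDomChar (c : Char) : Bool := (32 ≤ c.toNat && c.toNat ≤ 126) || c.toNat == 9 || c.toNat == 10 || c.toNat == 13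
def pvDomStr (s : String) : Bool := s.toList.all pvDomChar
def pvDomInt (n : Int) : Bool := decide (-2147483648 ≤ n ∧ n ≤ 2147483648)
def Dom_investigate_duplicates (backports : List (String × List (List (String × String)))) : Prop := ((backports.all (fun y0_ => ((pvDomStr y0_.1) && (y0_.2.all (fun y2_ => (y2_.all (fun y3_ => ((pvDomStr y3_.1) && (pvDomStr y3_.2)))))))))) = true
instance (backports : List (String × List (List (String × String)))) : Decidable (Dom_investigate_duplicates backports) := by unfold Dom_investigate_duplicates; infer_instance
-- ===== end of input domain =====

-- B replaces A's hash-bucketing dict with a flatten / ordered-dedup / group-by-scan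
-- decomposition (objective: alternative; equivalence is about the return value only).

abbrev pvBP := List (String × String)
abbrev pvT := String × String × pvBP

-- ===== PORT A =====
-- one iteration of A's inner loop body after 'upstream_hash = bp["upstream_commit_hash"]'
def pvStepA (m : PySem.Dict String (List (String × pvBP))) (h : String) (repo : String) (bp : pvBP) : PySem.Dict String (List (String × pvBP)) :=
  let m1 := if m.contains h then m else m.insert h []
  m1.modify h [] (fun v => v ++ [(repo, bp)])

def investigate_duplicates (backports : List (String × List (List (String × String)))) : List (String × List (String × (List (String × String)))) :=
  let m := backports.foldl (fun m rb =>
    rb.2.foldl (fun m bp =>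
      match PySem.Dict.get? (PySem.Dict.mk bp) "upstream_commit_hash" with
      | none => m            -- Python raises KeyError here; excluded by Pre_
      | some h => pvStepA m h rb.1 bp) m) PySem.Dict.empty
  m.items.filter (fun kv => decide (kv.2.length > 1))

-- ===== PORT B =====
-- the (repo, bp) pairs of the triples whose hash is h, in stream order
def pvPairsOf (h : String) (ts : List pvT) : List (String × pvBP) :=
  (ts.filter (fun t => t.1 == h)).map (fun t => (t.2.1, t.2.2))

def investigate_duplicates_alt (backports : List (String × List (List (String × String)))) : List (String × List (String × (List (String × String)))) :=
  let triples : List pvT := backports.flatMap (fun rb =>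
    rb.2.filterMap (fun bp =>
      (PySem.Dict.get? (PySem.Dict.mk bp) "upstream_commit_hash").map (fun h => (h, rb.1, bp))))
      -- Python raises KeyError on a bp without the key; excluded by Pre_
  let hashes := PySem.List.dedup (triples.map (fun t => t.1))
  let groups := hashes.map (fun h => (h, pvPairsOf h triples))
  groups.filter (fun kv => decide (kv.2.length > 1))

-- ===== PRECONDITION & SPEC =====
-- Pre_ excludes exactly the inputs where some backport dict lacks the key
-- "upstream_commit_hash", on which A raises KeyError.
def Pre_investigate_duplicates (backports : List (String × List (List (String × String)))) : Prop :=
  (backports.all (fun rb => rb.2.all (fun bp => bp.any (fun kv => kv.1 == "upstream_commit_hash")))) = true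
instance (backports : List (String × List (List (String × String)))) : Decidable (Pre_investigate_duplicates backports) := by unfold Pre_investigate_duplicates; infer_instance

def pvWitness_investigate_duplicates : (List (String × List (List (String × String)))) :=
  [("r1", [[("upstream_commit_hash", "a")], [("upstream_commit_hash", "b")]]),
   ("r2", [[("upstream_commit_hash", "a"), ("patch", "p")]])]

def Spec_investigate_duplicates (backports : List (String × List (List (String × String)))) (out : List (String × List (String × (List (String × String))))) : Prop := out = investigate_duplicates_alt backports
instance (backports : List (String × List (List (String × String)))) (out : List (String × List (String × (List (String × String))))) : Decidable (Spec_investigate_duplicates backports out) := by unfold Spec_investigate_duplicates; infer_instance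

-- ===== CLAIM (what is proved, stated in full; the proofs are below) =====
def Claim_equal_investigate_duplicates : Prop := ∀ (backports : List (String × List (List (String × String)))), Dom_investigate_duplicates backports → Pre_investigate_duplicates backports → Spec_investigate_duplicates backports (investigate_duplicates backports)

-- ===== LEMMAS AND PROOFS =====

-- the flattened triple stream both programs traverse
def pvTriples (backports : List (String × List (List (String × String)))) : List pvT :=
  backports.flatMap (fun rb =>
    rb.2.filterMap (fun bp =>
      (PySem.Dict.get? (PySem.Dict.mk bp) "upstream_commit_hash").map (fun h => (h, rb.1, bp))))

-- seen-set update shared by the grouping recursions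
def pvUpd (seen : String → Bool) (x : String) : String → Bool := fun y => seen y || (x == y)

-- first-occurrence grouping of the triple stream, skipping hashes in `seen`
def pvGroupNew : List pvT → (String → Bool) → List (String × List (String × pvBP))
  | [], _ => []
  | t :: ts, seen =>
    if seen t.1 then pvGroupNew ts seen
    else (t.1, (t.2.1, t.2.2) :: pvPairsOf t.1 ts) :: pvGroupNew ts (pvUpd seen t.1)

-- ordered dedup skipping elements in `seen`
def pvDedupF : List String → (String → Bool) → List String
  | [], _ => []
  | x :: xs, seen => if seen x then pvDedupF xs seen else x :: pvDedupF xs (pvUpd seen x)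

-- ---- generic facts about the two programs ----

-- under distinct keys, find? at a present key returns exactly that entry
theorem pv_find?_key {l : List (String × List (String × pvBP))} {p : String × List (String × pvBP)} {h : String}
    (hnd : (l.map Prod.fst).Nodup) (hp : p ∈ l) (hk : p.1 = h) :
    l.find? (fun q => q.1 == h) = some p := by
  induction l with
  | nil => cases hp
  | cons q l ih =>
    simp only [List.map_cons, List.nodup_cons] at hnd
    rcases List.mem_cons.mp hp with rfl | hpl
    · simp [List.find?, hk]
    · have hqh : (q.1 == h) = false := by
        refine beq_eq_false_iff_ne.mpr ?_
        intro e
        have hm : p.1 ∈ l.map Prod.fst := List.mem_map_of_mem hpl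
        rw [hk] at hm
        exact hnd.1 (e ▸ hm)
      simp [List.find?, hqh, ih hnd.2 hpl]

-- items of one A-step, under distinct keys
theorem pv_stepA_items (m : PySem.Dict String (List (String × pvBP))) (h r : String) (b : pvBP)
    (hnd : (m.items.map Prod.fst).Nodup) :
    (pvStepA m h r b).items =
      if m.items.any (fun p => p.1 == h) then
        m.items.map (fun p => if p.1 == h then (p.1, p.2 ++ [(r, b)]) else p)
      else m.items ++ [(h, [(r, b)])] := by
  by_cases hc : m.items.any (fun p => p.1 == h) = true
  · obtain ⟨p, hp, hph⟩ := List.any_eq_true.mp hc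
    have hk : p.1 = h := beq_iff_eq.mp hph
    have hf := pv_find?_key hnd hp hk
    simp only [pvStepA, PySem.Dict.contains, hc, if_true, PySem.Dict.modify,
      PySem.Dict.getD, PySem.Dict.get?, PySem.Dict.insert, hf, Option.map_some,
      Option.getD_some]
    refine List.map_congr_left (fun q hq => ?_)
    by_cases hqh : (q.1 == h) = true
    · have := pv_find?_key hnd hq (beq_iff_eq.mp hqh)
      rw [hf] at this
      obtain rfl : p = q := Option.some_injective _ this
      simp [beq_iff_eq.mp hqh]
    · simp [hqh]
  · have hcb : m.items.any (fun p => p.1 == h) = false := Bool.not_eq_true _ |>.mp hc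
    have hfn : m.items.find? (fun q => q.1 == h) = none := by
      rw [List.find?_eq_none]
      intro q hq
      exact fun hqh => hc (List.any_eq_true.mpr ⟨q, hq, hqh⟩)
    have hall : ∀ q ∈ m.items, (q.1 == h) = false := by
      intro q hq
      cases hqe : (q.1 == h) with
      | true => exact absurd (List.any_eq_true.mpr ⟨q, hq, hqe⟩) hc
      | false => rfl
    simp only [pvStepA, PySem.Dict.contains, hcb, PySem.Dict.modify,
      PySem.Dict.getD, PySem.Dict.get?, PySem.Dict.insert]
    simp only [Bool.false_eq_true, if_false, List.any_append, hcb, Bool.false_or,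
      List.any_cons, List.any_nil, beq_self_eq_true, Bool.or_false, if_true,
      List.find?_append, hfn, Option.none_or, List.find?_cons, Option.map_some,
      Option.getD_some, List.map_append]
    have hid : List.map (fun p => if (p.1 == h) = true then (h, ([] : List (String × pvBP)) ++ [(r, b)]) else p) m.items = m.items := by
      rw [List.map_congr_left (g := id) (fun q hq => by simp [hall q hq])]
      exact List.map_id _
    rw [hid]
    simp

theorem pv_stepA_keys (m : PySem.Dict String (List (String × pvBP))) (h r : String) (b : pvBP)
    (hnd : (m.items.map Prod.fst).Nodup) :
    ((pvStepA m h r b).items.map Prod.fst) =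
      if m.items.any (fun p => p.1 == h) then m.items.map Prod.fst
      else m.items.map Prod.fst ++ [h] := by
  rw [pv_stepA_items m h r b hnd]
  by_cases hc : m.items.any (fun p => p.1 == h) = true
  · simp only [hc, if_true, List.map_map]
    refine List.map_congr_left (fun q hq => ?_)
    by_cases hqh : (q.1 == h) = true <;> simp [Function.comp, hqh]
  · have hcb := (Bool.not_eq_true _).mp hc
    simp [hcb]

theorem pv_stepA_nodup (m : PySem.Dict String (List (String × pvBP))) (h r : String) (b : pvBP)
    (hnd : (m.items.map Prod.fst).Nodup) :
    ((pvStepA m h r b).items.map Prod.fst).Nodup := by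
  rw [pv_stepA_keys m h r b hnd]
  by_cases hc : m.items.any (fun p => p.1 == h) = true
  · simpa [hc] using hnd
  · have hcb := (Bool.not_eq_true _).mp hc
    have hnm : h ∉ m.items.map Prod.fst := by
      intro hm
      obtain ⟨p, hp, he⟩ := List.mem_map.mp hm
      have : (m.items.any fun p => p.1 == h) = true :=
        List.any_eq_true.mpr ⟨p, hp, beq_iff_eq.mpr he⟩
      exact hc this
    simp only [hcb, Bool.false_eq_true, if_false]
    simp [List.nodup_append, hnd]
    intro a x hax ha
    exact hnm (ha ▸ List.mem_map_of_mem hax)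

-- A's nested loops are a fold of pvStepA over the flattened triple stream
theorem pv_foldA_flatten (backports : List (String × List (List (String × String))))
    (m : PySem.Dict String (List (String × pvBP))) :
    backports.foldl (fun m rb =>
      rb.2.foldl (fun m bp =>
        match PySem.Dict.get? (PySem.Dict.mk bp) "upstream_commit_hash" with
        | none => m
        | some h => pvStepA m h rb.1 bp) m) m
    = (pvTriples backports).foldl (fun m t => pvStepA m t.1 t.2.1 t.2.2) m := by
  induction backports generalizing m with
  | nil => rfl
  | cons rb bs ih =>
    simp only [pvTriples] at ih ⊢
    rw [List.foldl_cons, List.flatMap_cons, List.foldl_append, ih]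
    congr 1
    induction rb.2 generalizing m with
    | nil => rfl
    | cons bp bps ih2 =>
      cases hg : PySem.Dict.get? (PySem.Dict.mk bp) "upstream_commit_hash" with
      | none => simp [hg, ih2]
      | some h => simp [hg, ih2]

-- the seen-set of a key list, as a predicate
def pvSeen (l : List String) : String → Bool := fun y => l.any (fun k => k == y)

theorem pv_seen_any (m : PySem.Dict String (List (String × pvBP))) (y : String) :
    pvSeen (m.items.map Prod.fst) y = m.items.any (fun p => p.1 == y) := by
  simp only [pvSeen, List.any_map, Function.comp_def]

-- main loop invariant: the dict after folding a stream, as an association list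
theorem pv_fold_items (ts : List pvT) (m : PySem.Dict String (List (String × pvBP)))
    (hnd : (m.items.map Prod.fst).Nodup) :
    (ts.foldl (fun m t => pvStepA m t.1 t.2.1 t.2.2) m).items =
      m.items.map (fun p => (p.1, p.2 ++ pvPairsOf p.1 ts))
        ++ pvGroupNew ts (pvSeen (m.items.map Prod.fst)) := by
  induction ts generalizing m with
  | nil => simp [pvGroupNew, pvPairsOf]
  | cons t ts ih =>
    rw [List.foldl_cons, ih _ (pv_stepA_nodup m t.1 t.2.1 t.2.2 hnd)]
    have hkeys := pv_stepA_keys m t.1 t.2.1 t.2.2 hnd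
    by_cases hc : m.items.any (fun p => p.1 == t.1) = true
    · simp only [hc, if_true] at hkeys
      rw [hkeys, pv_stepA_items m t.1 t.2.1 t.2.2 hnd]
      simp only [hc, if_true]
      have hseen : pvSeen (m.items.map Prod.fst) t.1 = true := (pv_seen_any m t.1).trans hc
      have hgn : pvGroupNew (t :: ts) (pvSeen (m.items.map Prod.fst))
          = pvGroupNew ts (pvSeen (m.items.map Prod.fst)) := by
        simp [pvGroupNew, hseen]
      rw [hgn, List.map_map]
      congr 1
      refine List.map_congr_left (fun q hq => ?_)
      by_cases hqh : (q.1 == t.1) = true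
      · have he : q.1 = t.1 := beq_iff_eq.mp hqh
        simp [pvPairsOf, he]
      · have hne : q.1 ≠ t.1 := fun e => hqh (beq_iff_eq.mpr e)
        have he : (t.1 == q.1) = false := beq_eq_false_iff_ne.mpr (fun e => hne e.symm)
        simp [pvPairsOf, he, hne]
    · have hcb := (Bool.not_eq_true _).mp hc
      simp only [hcb, Bool.false_eq_true, if_false] at hkeys
      rw [hkeys, pv_stepA_items m t.1 t.2.1 t.2.2 hnd]
      simp only [hcb, Bool.false_eq_true, if_false]
      have hseen : pvSeen (m.items.map Prod.fst) t.1 = false := (pv_seen_any m t.1).trans hcb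
      have hupd : pvSeen (m.items.map Prod.fst ++ [t.1]) = pvUpd (pvSeen (m.items.map Prod.fst)) t.1 := by
        funext y
        simp [pvSeen, pvUpd, List.any_append]
      rw [hupd, List.map_append]
      have hgn : pvGroupNew (t :: ts) (pvSeen (m.items.map Prod.fst))
          = (t.1, (t.2.1, t.2.2) :: pvPairsOf t.1 ts) :: pvGroupNew ts (pvUpd (pvSeen (m.items.map Prod.fst)) t.1) := by
        simp [pvGroupNew, hseen]
      rw [hgn, List.append_assoc]
      congr 1
      · refine List.map_congr_left (fun q hq => ?_)
        have hqh : (q.1 == t.1) = false := by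
          cases hqe : (q.1 == t.1) with
          | true => exact absurd (List.any_eq_true.mpr ⟨q, hq, hqe⟩) hc
          | false => rfl
        have he : (t.1 == q.1) = false := by
          refine beq_eq_false_iff_ne.mpr ?_
          intro e
          exact absurd (beq_iff_eq.mpr e.symm) (by simp [hqh])
        simp [pvPairsOf, he]

-- membership in the seen-skipping dedup implies unseen
theorem pv_mem_dedupF {xs : List String} {seen : String → Bool} {x : String}
    (hx : x ∈ pvDedupF xs seen) : seen x = false := by
  induction xs generalizing seen with
  | nil => simp [pvDedupF] at hx
  | cons y xs ih =>
    by_cases hs : seen y = true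
    · simp only [pvDedupF, hs, if_true] at hx
      exact ih hx
    · have hsb := (Bool.not_eq_true _).mp hs
      simp only [pvDedupF, hsb, Bool.false_eq_true, if_false] at hx
      rcases List.mem_cons.mp hx with rfl | hx'
      · exact hsb
      · have := ih hx'
        simp only [pvUpd, Bool.or_eq_false_iff] at this
        exact this.1

-- the grouping is the dedup of the hashes, each mapped to its pair group
theorem pv_groupNew_eq (ts : List pvT) (seen : String → Bool) :
    pvGroupNew ts seen =
      (pvDedupF (ts.map (fun t => t.1)) seen).map (fun h => (h, pvPairsOf h ts)) := by
  induction ts generalizing seen with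
  | nil => rfl
  | cons t ts ih =>
    by_cases hs : seen t.1 = true
    · simp only [pvGroupNew, pvDedupF, List.map_cons, hs, if_true]
      rw [ih seen]
      refine List.map_congr_left (fun h hh => ?_)
      have hsf : seen h = false := pv_mem_dedupF hh
      have hne : (t.1 == h) = false := by
        refine beq_eq_false_iff_ne.mpr ?_
        intro e
        rw [← e, hs] at hsf
        exact Bool.true_eq_false.mp hsf
      simp [pvPairsOf, hne]
    · have hsb := (Bool.not_eq_true _).mp hs
      simp only [pvGroupNew, pvDedupF, List.map_cons, hsb, Bool.false_eq_true, if_false]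
      rw [ih (pvUpd seen t.1)]
      congr 1
      · simp [pvPairsOf]
      · refine List.map_congr_left (fun h hh => ?_)
        have hsf : pvUpd seen t.1 h = false := pv_mem_dedupF hh
        have hne : (t.1 == h) = false := by
          simp only [pvUpd, Bool.or_eq_false_iff] at hsf
          exact hsf.2
        simp [pvPairsOf, hne]

-- PySem's ordered dedup is pvDedupF from the empty seen set
theorem pv_ofList_dedupF (xs : List String) : ∀ (acc : List String),
    List.foldl PySem.Set.add acc xs = acc ++ pvDedupF xs (fun y => acc.contains y) := by
  induction xs with
  | nil => intro acc; simp [pvDedupF]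
  | cons x xs ih =>
    intro acc
    rw [List.foldl_cons]
    by_cases hx : acc.contains x = true
    · have hadd : PySem.Set.add acc x = acc := by
        simp only [PySem.Set.add, PySem.Set.contains, hx, if_true]
      rw [hadd, ih acc]
      simp only [pvDedupF, hx, if_true]
    · have hxb := (Bool.not_eq_true _).mp hx
      have hadd : PySem.Set.add acc x = acc ++ [x] := by
        simp only [PySem.Set.add, PySem.Set.contains, hxb, Bool.false_eq_true, if_false]
      rw [hadd, ih (acc ++ [x])]
      have hupd : (fun y => (acc ++ [x]).contains y) = pvUpd (fun y => acc.contains y) x := by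
        funext y
        simp only [pvUpd, List.contains_eq_mem, List.mem_append, List.mem_cons,
          List.not_mem_nil, or_false, Bool.decide_or]
        by_cases h : y = x
        · simp [h]
        · simp [h, beq_eq_false_iff_ne.mpr (fun e => h e.symm)]
      rw [hupd]
      simp only [pvDedupF, hxb, Bool.false_eq_true, if_false, List.append_assoc,
        List.singleton_append]

theorem pv_dedup_eq (xs : List String) :
    PySem.List.dedup xs = pvDedupF xs (fun _ => false) := by
  have h := pv_ofList_dedupF xs []
  simp only [List.nil_append] at h
  rw [PySem.List.dedup, PySem.Set.ofList]
  exact h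

-- ===== VERDICT (by name: the statement is the Claim_ definition above) =====
theorem investigate_duplicates_spec : Claim_equal_investigate_duplicates := by
  intro backports _ _
  unfold Spec_investigate_duplicates
  rw [investigate_duplicates, investigate_duplicates_alt]
  rw [pv_foldA_flatten]
  have hemp : ((PySem.Dict.empty : PySem.Dict String (List (String × pvBP))).items.map Prod.fst).Nodup := by
    simp [PySem.Dict.empty]
  rw [pv_fold_items _ _ hemp]
  have hseen0 : pvSeen ((PySem.Dict.empty : PySem.Dict String (List (String × pvBP))).items.map Prod.fst) = (fun _ => false) := by
    funext y
    simp [pvSeen, PySem.Dict.empty]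
  simp only [PySem.Dict.empty, List.map_nil, List.nil_append] at *
  rw [hseen0, pv_groupNew_eq, ← pv_dedup_eq]
  rfl
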